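-- pv_equiv track=rewrite | github.com/a-brandon/practice | edabit/longest_abecedarion_word.py | longest_abecedarian
-- ===== SOURCE A (Python) =====
-- from string import ascii_lowercase
--
-- def longest_abecedarian(lst):
--     alpha = ascii_lowercase
--     abecs = {}
--     for word in lst:
--         letters = [alpha.index(x) for x in word]
--         if sorted(letters) == letters:
--             abecs[word] = len(word)
--     longest_abecs = [k for k, v in abecs.items() if v == max(abecs.values())]
--     return longest_abecs[0] if longest_abecs else ''
-- ===== SOURCE B (Python) =====
-- from string import ascii_lowercase
--
-- def longest_abecedarian(lst):
--     alpha = ascii_lowercase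
--     best = ''
--     for word in lst:
--         idx = [alpha.index(c) for c in word]
--         if len(word) > len(best) and all(i <= j for i, j in zip(idx, idx[1:])):
--             best = word
--     return best
-- ===== Notes on version B (the rewrite author's own statement) =====
-- stated objective: alternative
-- what changed: Single left-to-right pass keeping the current best word, testing abecedarian order by one adjacent-index comparison per word, instead of sorting each word's index list, collecting candidates in a dict and re-computing max(dict.values()) for every dict entry; measured ~1.4x faster, below the 1.5x bar, so no speed is claimed.
import Mathlib
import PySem

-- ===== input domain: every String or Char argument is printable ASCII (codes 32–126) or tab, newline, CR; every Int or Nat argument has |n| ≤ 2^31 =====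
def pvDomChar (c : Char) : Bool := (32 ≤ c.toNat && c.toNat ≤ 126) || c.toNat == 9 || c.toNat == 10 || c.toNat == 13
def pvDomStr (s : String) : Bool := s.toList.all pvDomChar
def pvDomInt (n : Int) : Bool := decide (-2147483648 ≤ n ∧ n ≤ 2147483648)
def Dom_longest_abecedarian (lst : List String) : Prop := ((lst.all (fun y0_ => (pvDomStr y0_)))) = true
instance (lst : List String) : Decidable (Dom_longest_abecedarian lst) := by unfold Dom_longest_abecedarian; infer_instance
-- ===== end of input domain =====

-- B replaces A's per-word index-list sort and per-item max(dict.values()) re-computation by one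
-- left-to-right pass with an adjacent-index comparison; equal return value on Pre_ (all-lowercase words).

-- ===== PORT A =====
def pvAlpha : List Char := "abcdefghijklmnopqrstuvwxyz".toList

-- one iteration of A's dict-building loop
def pvStepA (d : PySem.Dict String Int) (word : String) : PySem.Dict String Int :=
  let lettersOpt := word.toList.map (fun x => PySem.List.index? pvAlpha x)
  if lettersOpt.all Option.isSome then
    let letters := lettersOpt.reduceOption
    if PySem.List.sorted letters (fun y => y) = letters then
      d.insert word (PySem.Str.len word)
    else d
  else d  -- alpha.index(x) raises ValueError here (char not in a..z): excluded by Pre_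

def longest_abecedarian (lst : List String) : String :=
  let abecs := lst.foldl pvStepA PySem.Dict.empty
  -- [k for k, v in abecs.items() if v == max(abecs.values())]; max is evaluated only when
  -- items is nonempty, so comparing against max? (none on empty) is exact
  let longest_abecs := abecs.items.filterMap (fun kv =>
    if some kv.2 = PySem.List.max? abecs.values (fun v => v) then some kv.1 else none)
  longest_abecs.headD ""

-- ===== PORT B =====
-- one iteration of B's single pass: len(word) > len(best) and all adjacent index pairs non-decreasing
def pvStepB (best word : String) : String :=
  let idxOpt := word.toList.map (fun c => PySem.List.index? pvAlpha c)
  if idxOpt.all Option.isSome then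
    let idx := idxOpt.reduceOption
    if PySem.Str.len word > PySem.Str.len best
        && (idx.zip idx.tail).all (fun p => decide (p.1 ≤ p.2))
    then word else best
  else best  -- alpha.index(c) raises ValueError here (char not in a..z): excluded by Pre_

def longest_abecedarian_alt (lst : List String) : String :=
  lst.foldl pvStepB ""

-- ===== PRECONDITION & SPEC =====
-- Pre_ = exactly the inputs where A returns: every character of every word is a lowercase
-- ASCII letter (otherwise alpha.index raises ValueError).
def Pre_longest_abecedarian (lst : List String) : Prop :=
  lst.all (fun w => w.toList.all (fun c => decide ('a' ≤ c ∧ c ≤ 'z'))) = true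
instance (lst : List String) : Decidable (Pre_longest_abecedarian lst) := by
  unfold Pre_longest_abecedarian; infer_instance
def pvWitness_longest_abecedarian : List String := ["abc", "zoo", "dent", "ax"]

def Spec_longest_abecedarian (lst : List String) (out : String) : Prop :=
  out = longest_abecedarian_alt lst
instance (lst : List String) (out : String) : Decidable (Spec_longest_abecedarian lst out) := by
  unfold Spec_longest_abecedarian; infer_instance

-- ===== CLAIM (what is proved, stated in full; the proofs are below) =====
def Claim_equal_longest_abecedarian : Prop := ∀ (lst : List String),
  Dom_longest_abecedarian lst → Pre_longest_abecedarian lst →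
  Spec_longest_abecedarian lst (longest_abecedarian lst)

-- ===== LEMMAS AND PROOFS =====

-- B's abecedarian test, as a predicate
def pvAbec (w : String) : Bool :=
  (w.toList.zip w.toList.tail).all (fun p => decide (p.1 ≤ p.2))

-- A's finalizer, applied to any dict
def pvFinA (d : PySem.Dict String Int) : String :=
  (d.items.filterMap (fun kv =>
    if some kv.2 = PySem.List.max? d.values (fun v => v) then some kv.1 else none)).headD ""

-- invariant tying A's dict to B's best-so-far
def pvInv (items : List (String × Int)) (b : String) : Prop :=
  (items.map Prod.fst).Nodup ∧
  (∀ p ∈ items, p.2 = PySem.Str.len p.1 ∧ p.2 ≤ PySem.Str.len b) ∧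
  (items = [] → b = "") ∧
  (items ≠ [] → items.find? (fun p => p.2 == PySem.Str.len b) = some (b, PySem.Str.len b))

lemma pvIndexAlpha (c : Char) (h1 : 'a' ≤ c) (h2 : c ≤ 'z') :
    PySem.List.index? pvAlpha c = some (c.toNat - 97) := by
  have hc : Char.ofNat c.toNat = c := Char.ofNat_toNat c
  have hn1 : 97 ≤ c.toNat := h1
  have hn2 : c.toNat ≤ 122 := h2
  set n := c.toNat with hdef
  rw [← hc]
  interval_cases n <;> decide

lemma pvZipAll {α : Type} [LinearOrder α] (l : List α) :
    ((l.zip l.tail).all (fun p => decide (p.1 ≤ p.2)) = true) ↔ l.Pairwise (· ≤ ·) := by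
  rw [← List.isChain_iff_pairwise]
  induction l with
  | nil => simp
  | cons x t ih =>
    cases t with
    | nil => simp
    | cons y s => simp_all

lemma pvMapReduce (w : String) (hw : ∀ c ∈ w.toList, 'a' ≤ c ∧ c ≤ 'z') :
    w.toList.map (fun x => PySem.List.index? pvAlpha x)
      = w.toList.map (fun x => some (x.toNat - 97)) :=
  List.map_congr_left (fun c hc => pvIndexAlpha c (hw c hc).1 (hw c hc).2)

lemma pvRed (w : String) : (w.toList.map (fun x => some (x.toNat - 97))).reduceOption
    = w.toList.map (fun x => x.toNat - 97) := by
  induction w.toList with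
  | nil => rfl
  | cons c t ih => simp [List.reduceOption_cons_of_some, ih]

-- the index list of a lowercase word is non-decreasing iff its characters are
lemma pvIdxPairwise (w : String) (hw : ∀ c ∈ w.toList, 'a' ≤ c ∧ c ≤ 'z') :
    (w.toList.map (fun x => x.toNat - 97)).Pairwise (· ≤ ·) ↔ pvAbec w = true := by
  rw [List.pairwise_map, pvAbec, pvZipAll]
  constructor
  · intro h
    exact h.imp_of_mem (fun {a b} ha hb hab => by
      have h1 := hw a ha; have h2 := hw b hb
      have ha1 : 97 ≤ a.toNat := h1.1
      have hb1 : 97 ≤ b.toNat := h2.1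
      show a.toNat ≤ b.toNat
      omega)
  · intro h
    exact h.imp_of_mem (fun {a b} ha hb hab => by
      have hab' : a.toNat ≤ b.toNat := hab
      show a.toNat - 97 ≤ b.toNat - 97
      omega)

lemma pvStepA_eq (w : String) (hw : ∀ c ∈ w.toList, 'a' ≤ c ∧ c ≤ 'z')
    (d : PySem.Dict String Int) :
    pvStepA d w = if pvAbec w then d.insert w (PySem.Str.len w) else d := by
  unfold pvStepA
  rw [pvMapReduce w hw]
  have hall : (w.toList.map (fun x => some (x.toNat - 97))).all Option.isSome = true := by
    simp [List.all_eq_true]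
  rw [if_pos hall]
  simp only [pvRed w]
  have hiff : (PySem.List.sorted (w.toList.map (fun x => x.toNat - 97)) (fun y => y)
        = w.toList.map (fun x => x.toNat - 97)) ↔ pvAbec w = true := by
    rw [← pvIdxPairwise w hw]
    constructor
    · intro h
      have hp := PySem.List.sorted_pairwise (w.toList.map (fun x => x.toNat - 97)) (fun y => y)
      rw [h] at hp
      exact hp
    · exact PySem.List.sorted_eq_self_of_pairwise _ _
  by_cases h : pvAbec w = true
  · rw [if_pos (hiff.mpr h), if_pos h]
  · rw [if_neg (fun hh => h (hiff.mp hh)), if_neg h]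

-- B's step, reduced on a lowercase word
lemma pvStepB_eq (b w : String) (hw : ∀ c ∈ w.toList, 'a' ≤ c ∧ c ≤ 'z') :
    pvStepB b w = if (PySem.Str.len w > PySem.Str.len b) && pvAbec w then w else b := by
  unfold pvStepB
  rw [pvMapReduce w hw]
  have hall : (w.toList.map (fun x => some (x.toNat - 97))).all Option.isSome = true := by
    simp [List.all_eq_true]
  rw [if_pos hall]
  simp only [pvRed w]
  have hzip : ((w.toList.map (fun x => x.toNat - 97)).zip
        (w.toList.map (fun x => x.toNat - 97)).tail).all (fun p => decide (p.1 ≤ p.2))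
      = pvAbec w := by
    rcases Bool.eq_false_or_eq_true (pvAbec w) with h | h
    · rw [h]
      exact (pvZipAll _).mpr ((pvIdxPairwise w hw).mpr h)
    · rw [h, ← Bool.not_eq_true, pvZipAll, pvIdxPairwise w hw, h]
      exact Bool.false_ne_true
  rw [hzip]

lemma pvHeadFilter (items : List (String × Int)) (m : Int) :
    (items.filterMap (fun kv => if some kv.2 = some m then some kv.1 else none)).head?
      = (items.find? (fun p => p.2 == m)).map Prod.fst := by
  induction items with
  | nil => simp
  | cons p t ih =>
    by_cases h : p.2 = m
    · rw [List.filterMap_cons, List.find?_cons_of_pos (by simpa using h)]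
      simp [h]
    · rw [List.filterMap_cons, List.find?_cons_of_neg (by simpa using h)]
      simpa [h] using ih

lemma pvFinA_eq (d : PySem.Dict String Int) (b : String) (hInv : pvInv d.items b) :
    pvFinA d = b := by
  obtain ⟨hnd, hval, hemp, hfind⟩ := hInv
  unfold pvFinA
  cases hitems : d.items with
  | nil => simpa [PySem.Dict.values, hitems] using (hemp hitems).symm
  | cons p t =>
    have hne : d.items ≠ [] := by simp [hitems]
    have hfind' := hfind hne
    have hvals : d.values = p.2 :: t.map Prod.snd := by
      simp [PySem.Dict.values, hitems]
    -- max of values is len b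
    have hmax : PySem.List.max? d.values (fun v => v) = some (PySem.Str.len b) := by
      rw [hvals, PySem.List.max?_id_cons]
      have hle := PySem.List.le_foldl_max (t.map Prod.snd) p.2
      have hmem := PySem.List.foldl_max_mem (t.map Prod.snd) p.2
      have hub : ∀ v ∈ p.2 :: t.map Prod.snd, v ≤ PySem.Str.len b := by
        intro v hv
        rcases List.mem_cons.mp hv with h | h
        · exact h ▸ (hval p (by simp [hitems])).2
        · obtain ⟨q, hq, hq2⟩ := List.mem_map.mp h
          exact hq2 ▸ (hval q (by simp [hitems, hq])).2
      have hmem' : List.foldl max p.2 (t.map Prod.snd) ∈ p.2 :: t.map Prod.snd := by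
        rcases hmem with h | h
        · rw [h]; exact List.mem_cons_self
        · exact List.mem_cons_of_mem _ h
      have h1 : List.foldl max p.2 (t.map Prod.snd) ≤ PySem.Str.len b := hub _ hmem'
      have hbmem : (b, PySem.Str.len b) ∈ d.items := List.mem_of_find?_eq_some hfind'
      have h2 : PySem.Str.len b ≤ List.foldl max p.2 (t.map Prod.snd) := by
        have : PySem.Str.len b ∈ p.2 :: t.map Prod.snd := by
          rw [← hvals]
          simp only [PySem.Dict.values]
          exact List.mem_map.mpr ⟨_, hbmem, rfl⟩
        rcases List.mem_cons.mp this with h | h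
        · exact h ▸ hle.1
        · exact hle.2 _ h
      exact congrArg some (le_antisymm h1 h2)
    rw [hmax, ← hitems]
    have := pvHeadFilter d.items (PySem.Str.len b)
    rw [hfind'] at this
    rw [List.headD_eq_head?_getD, this]
    rfl

lemma pvStrLenNonneg (w : String) : 0 ≤ PySem.Str.len w := by
  simp [PySem.Str.len_eq]

lemma pvLenZeroEmpty (w : String) (h : PySem.Str.len w ≤ 0) : w = "" := by
  have := pvStrLenNonneg w
  have hlen : PySem.Str.len w = 0 := le_antisymm h this
  rw [PySem.Str.len_eq] at hlen
  have : w.toList.length = 0 := by exact_mod_cast hlen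
  exact String.toList_eq_nil_iff.mp (List.length_eq_zero_iff.mp this)

lemma pvStepB_abec (b w : String) (hw : ∀ c ∈ w.toList, 'a' ≤ c ∧ c ≤ 'z')
    (h : pvAbec w = true) :
    pvStepB b w = if PySem.Str.len b < PySem.Str.len w then w else b := by
  rw [pvStepB_eq b w hw, h]
  by_cases hl : PySem.Str.len b < PySem.Str.len w <;> simp [gt_iff_lt]

lemma pvStepB_not_abec (b w : String) (hw : ∀ c ∈ w.toList, 'a' ≤ c ∧ c ≤ 'z')
    (h : pvAbec w = false) : pvStepB b w = b := by
  rw [pvStepB_eq b w hw, h]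
  simp

-- the loop invariant is preserved by one fresh insertion
lemma pvInv_append (items : List (String × Int)) (b w : String)
    (hw : ∀ c ∈ w.toList, 'a' ≤ c ∧ c ≤ 'z') (habec : pvAbec w = true)
    (hInv : pvInv items b) (hnotin : w ∉ items.map Prod.fst) :
    pvInv (items ++ [(w, PySem.Str.len w)]) (pvStepB b w) := by
  obtain ⟨hnd, hval, hemp, hfind⟩ := hInv
  have hb' : pvStepB b w = if PySem.Str.len b < PySem.Str.len w then w else b :=
    pvStepB_abec b w hw habec
  refine ⟨?_, ?_, by simp, ?_⟩
  · rw [List.map_append]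
    rw [List.nodup_append]
    refine ⟨hnd, List.nodup_singleton w, ?_⟩
    intro a ha c hc
    rw [List.map_singleton, List.mem_singleton] at hc
    subst hc
    exact fun h => hnotin (h ▸ ha)
  · intro p hp
    rw [hb']
    rcases List.mem_append.mp hp with h | h
    · have := hval p h
      split_ifs with hlt
      · exact ⟨this.1, le_of_lt (lt_of_le_of_lt this.2 hlt)⟩
      · exact this
    · have hpw : p = (w, PySem.Str.len w) := by simpa using h
      subst hpw
      split_ifs with hlt
      · exact ⟨rfl, le_refl _⟩
      · exact ⟨rfl, le_of_not_gt hlt⟩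
  · intro _
    rw [hb']
    split_ifs with hlt
    · -- w is strictly longer than everything so far: it is the unique maximum entry
      have hnone : items.find? (fun p => p.2 == PySem.Str.len w) = none := by
        rw [List.find?_eq_none]
        intro p hp
        have := (hval p hp).2
        simp only [beq_iff_eq]
        omega
      rw [List.find?_append, hnone]
      simp
    · -- best unchanged; the old first-maximal entry is still first
      by_cases hni : items = []
      · have hb : b = "" := hemp hni
        have hw : w = "" := pvLenZeroEmpty w (by rw [hb] at hlt; simpa [PySem.Str.len_eq] using hlt)
        subst hb; subst hw; subst hni
        simp
      · rw [List.find?_append, hfind hni]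
        rfl

-- the main loop correspondence
lemma pvLoop (lst : List String)
    (hlc : ∀ w ∈ lst, ∀ c ∈ w.toList, 'a' ≤ c ∧ c ≤ 'z') :
    ∀ (d : PySem.Dict String Int) (b : String), pvInv d.items b →
    pvFinA (lst.foldl pvStepA d) = lst.foldl pvStepB b := by
  induction lst with
  | nil => intro d b hInv; exact pvFinA_eq d b hInv
  | cons w rest ih =>
    intro d b hInv
    have hw := hlc w (by simp)
    have hrest : ∀ u ∈ rest, ∀ c ∈ u.toList, 'a' ≤ c ∧ c ≤ 'z' :=
      fun u hu => hlc u (by simp [hu])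
    simp only [List.foldl_cons]
    rw [pvStepA_eq w hw d]
    by_cases habec : pvAbec w = true
    · rw [if_pos habec]
      by_cases hcont : d.contains w = true
      · -- w already a key: its stored value is len w, so the items list does not change,
        -- and len w ≤ len b so B keeps b too
        have hnd := hInv.1
        have hval := hInv.2.1
        have hmem : w ∈ d.items.map Prod.fst := by
          rw [← PySem.Dict.keys]
          exact (PySem.Dict.contains_iff_mem_keys d w).mp hcont
        have hitems : (d.insert w (PySem.Str.len w)).items = d.items := by
          rw [PySem.Dict.items_insert_of_contains d _ hcont]
          rw [List.map_congr_left (fun p hp => ?_), List.map_id_fun, id]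
          by_cases hpw : p.1 = w
          · have := (hval p hp).1
            simp [hpw, hpw ▸ this, Prod.ext_iff]
          · simp [hpw]
        have hlenw : PySem.Str.len w ≤ PySem.Str.len b := by
          obtain ⟨p, hp, hp1⟩ := List.mem_map.mp hmem
          have := hval p hp
          rw [← hp1, ← this.1]
          exact this.2
        have hstepb : pvStepB b w = b := by
          rw [pvStepB_abec b w hw habec, if_neg (not_lt.mpr hlenw)]
        rw [hstepb]
        exact ih hrest _ b (hitems ▸ hInv)
      · -- fresh key: items gains (w, len w) at the end
        have hcont' : d.contains w = false := by simpa using hcont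
        have hitems : (d.insert w (PySem.Str.len w)).items
            = d.items ++ [(w, PySem.Str.len w)] :=
          PySem.Dict.items_insert_of_not_contains d _ hcont'
        have hnotin : w ∉ d.items.map Prod.fst := by
          rw [← PySem.Dict.keys]
          intro hmem
          rw [← PySem.Dict.contains_iff_mem_keys] at hmem
          simp [hcont'] at hmem
        exact ih hrest _ _ (hitems ▸ pvInv_append d.items b w hw habec hInv hnotin)
    · rw [if_neg habec]
      rw [pvStepB_not_abec b w hw (Bool.not_eq_true _ ▸ eq_false_of_ne_true habec)]
      exact ih hrest d b hInv

lemma pvInvEmpty : pvInv (PySem.Dict.empty : PySem.Dict String Int).items "" := by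
  have h : (PySem.Dict.empty : PySem.Dict String Int).items = [] := rfl
  rw [h]
  exact ⟨List.nodup_nil, by simp, fun _ => rfl, fun hne => absurd rfl hne⟩

-- ===== VERDICT (by name: the statement is the Claim_ definition above) =====
theorem longest_abecedarian_spec : Claim_equal_longest_abecedarian := by
  intro lst _ hpre
  unfold Pre_longest_abecedarian at hpre
  rw [List.all_eq_true] at hpre
  have hpre' : ∀ w ∈ lst, ∀ c ∈ w.toList, 'a' ≤ c ∧ c ≤ 'z' := by
    intro w hw c hc
    have h1 := hpre w hw
    rw [List.all_eq_true] at h1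
    exact of_decide_eq_true (h1 c hc)
  show longest_abecedarian lst = longest_abecedarian_alt lst
  unfold longest_abecedarian longest_abecedarian_alt
  exact pvLoop lst hpre' PySem.Dict.empty "" pvInvEmpty
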